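-- pv_equiv track=rewrite | github.com/hyama1569/siera | augmentation/util/extract.py | extract_a_spans
-- ===== SOURCE A (Python) =====
-- def extract_a_spans(edits):
--     a_spans = []
--     seen_a = [0 for i in range(len(edits))]
--     for i in range(len(edits)):
--         if seen_a[i] != 1:
--             seen_a[i] = 1
--             if edits[i] != 'KEEP' and edits[i] != 'DEL':
--                 start = i
--                 j = i + 1
--                 flag = False
--                 while j < len(edits):
--                     if edits[j] != 'KEEP' and edits[j] != 'DEL':
--                         seen_a[j] = 1
--                         j += 1
--                     elif edits[j] == 'DEL':
--                         flag = True
--                         break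
--                     else:
--                         break
--                 end = j - 1
--                 if (flag == False) and (end - start >= 0):
--                     a_spans.append((start, end))
--     return a_spans
-- ===== SOURCE B (Python) =====
-- def extract_a_spans(edits):
--     # Flat single-pass state machine: `start` is the index of the open run (None if no run).
--     a_spans = []
--     start = None
--     for i, e in enumerate(edits):
--         if e != 'KEEP' and e != 'DEL':
--             if start is None:
--                 start = i
--         else:
--             if start is not None:
--                 if e != 'DEL':
--                     a_spans.append((start, i - 1))
--                 start = None
--     if start is not None:
--         a_spans.append((start, len(edits) - 1))
--     return a_spans
-- ===== Notes on version B (the rewrite author's own statement) =====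
-- stated objective: simpler
-- what changed: Replaces A's seen-array bookkeeping with nested rescanning while-loop by a flat single-pass state machine that keeps only the start index of the currently open run; same O(n) asymptotics but no auxiliary array and no inner loop.
import Mathlib
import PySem

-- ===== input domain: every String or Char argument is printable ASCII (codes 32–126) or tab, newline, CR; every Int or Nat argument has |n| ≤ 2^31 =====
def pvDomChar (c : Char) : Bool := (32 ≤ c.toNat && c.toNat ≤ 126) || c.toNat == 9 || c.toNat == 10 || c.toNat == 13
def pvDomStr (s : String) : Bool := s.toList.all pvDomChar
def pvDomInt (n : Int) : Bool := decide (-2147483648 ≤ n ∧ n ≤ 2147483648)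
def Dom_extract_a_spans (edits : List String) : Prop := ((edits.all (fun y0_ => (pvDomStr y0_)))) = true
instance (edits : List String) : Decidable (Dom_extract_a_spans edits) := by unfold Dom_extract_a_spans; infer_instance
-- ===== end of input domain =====

-- B replaces A's seen-array + nested while rescanning with a flat single-pass state machine (objective: simpler).

-- ===== PORT A =====
-- inner `while j < len(edits)` loop; returns (seen_a, j, flag).  Indices are in range, so
-- Nat indexing via getD/set is exact here (Python indices are the nonneg values of range()).
def pvInnerA (edits : List String) (seen : List Int) (j : Nat) : List Int × Nat × Bool :=
  if _h : j < edits.length then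
    let e := edits[j]?.getD ""
    if e != "KEEP" && e != "DEL" then pvInnerA edits (seen.set j 1) (j + 1)
    else if e == "DEL" then (seen, j, true)
    else (seen, j, false)
  else (seen, j, false)
termination_by edits.length - j

-- body of the `for i in range(len(edits))` loop; state = (seen_a, a_spans)
def pvOuterStepA (edits : List String) (st : List Int × List (Int × Int)) (i : Nat) :
    List Int × List (Int × Int) :=
  if st.1[i]?.getD 0 != 1 then
    let seen := st.1.set i 1
    let e := edits[i]?.getD ""
    if e != "KEEP" && e != "DEL" then
      let start : Int := (i : Int)
      let r := pvInnerA edits seen (i + 1)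
      let endv : Int := (r.2.1 : Int) - 1
      if (r.2.2 == false) && decide (endv - start ≥ 0) then (r.1, st.2 ++ [(start, endv)])
      else (r.1, st.2)
    else (seen, st.2)
  else st

def extract_a_spans (edits : List String) : List (Int × Int) :=
  ((List.range edits.length).foldl (pvOuterStepA edits)
    (List.replicate edits.length 0, [])).2

-- ===== PORT B =====
-- body of `for i, e in enumerate(edits)`; state = (start, a_spans).  enumerate indices are
-- the nonneg in-range positions, so zipIdx's Nat indices are exact.
def pvStepB (st : Option Nat × List (Int × Int)) (p : String × Nat) :
    Option Nat × List (Int × Int) :=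
  if p.1 != "KEEP" && p.1 != "DEL" then
    (match st.1 with | none => some p.2 | some s => some s, st.2)
  else
    match st.1 with
    | none => (none, st.2)
    | some s => if p.1 != "DEL" then (none, st.2 ++ [((s : Int), (p.2 : Int) - 1)])
                else (none, st.2)

def extract_a_spans_alt (edits : List String) : List (Int × Int) :=
  let r := edits.zipIdx.foldl pvStepB (none, [])
  match r.1 with
  | some s => r.2 ++ [((s : Int), (edits.length : Int) - 1)]
  | none => r.2

-- ===== PRECONDITION & SPEC =====
def Spec_extract_a_spans (edits : List String) (out : List (Int × Int)) : Prop := out = extract_a_spans_alt edits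
instance (edits : List String) (out : List (Int × Int)) : Decidable (Spec_extract_a_spans edits out) := by unfold Spec_extract_a_spans; infer_instance

-- ===== CLAIM (what is proved, stated in full; the proofs are below) =====
def Claim_equal_extract_a_spans : Prop := ∀ (edits : List String), Dom_extract_a_spans edits → Spec_extract_a_spans edits (extract_a_spans edits)

-- ===== LEMMAS AND PROOFS =====

def pvIsRun (e : String) : Bool := e != "KEEP" && e != "DEL"

-- first index ≥ j that is KEEP/DEL (or the length)
def pvScanEnd (edits : List String) (j : Nat) : Nat :=
  if j < edits.length then
    (if pvIsRun (edits[j]?.getD "") then pvScanEnd edits (j + 1) else j)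
  else j
termination_by edits.length - j

theorem pvScanEnd_ge (edits : List String) (j : Nat) : j ≤ pvScanEnd edits j := by
  fun_induction pvScanEnd edits j with
  | case1 j h hr ih => omega
  | case2 j h hr => omega
  | case3 j h => omega

theorem pvScanEnd_le (edits : List String) (j : Nat) (hj : j ≤ edits.length) :
    pvScanEnd edits j ≤ edits.length := by
  fun_induction pvScanEnd edits j with
  | case1 j h hr ih => exact ih (by omega)
  | case2 j h hr => omega
  | case3 j h => omega

theorem pvScanEnd_stop (edits : List String) (j : Nat) :
    pvScanEnd edits j < edits.length → pvIsRun (edits[pvScanEnd edits j]?.getD "") = false := by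
  fun_induction pvScanEnd edits j with
  | case1 j h hr ih => exact ih
  | case2 j h hr => intro _; simpa using hr
  | case3 j h => intro h'; omega

-- reference spec: the spans starting the scan at index i
def pvSpansFrom (edits : List String) (i : Nat) : List (Int × Int) :=
  if h : i < edits.length then
    if pvIsRun (edits[i]?.getD "") then
      let j := pvScanEnd edits (i + 1)
      (if j = edits.length ∨ edits[j]?.getD "" = "KEEP" then [((i : Int), (j : Int) - 1)] else [])
        ++ pvSpansFrom edits j
    else pvSpansFrom edits (i + 1)
  else []
termination_by edits.length - i
decreasing_by
  · have := pvScanEnd_ge edits (i + 1); omega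
  · omega

-- seen-array state: 1 exactly below m
def pvMask (n m : Nat) : List Int := (List.range n).map (fun k => if k < m then 1 else 0)

theorem pvMask_getD (n m k : Nat) :
    (pvMask n m)[k]?.getD 0 = if k < m ∧ k < n then 1 else 0 := by
  unfold pvMask
  rcases Nat.lt_or_ge k n with h | h
  · rw [List.getElem?_eq_getElem (by simpa using h)]
    simp [h]
  · rw [List.getElem?_eq_none (by simpa using h)]
    simp; omega

theorem pvMask_set (n m : Nat) (_hm : m ≤ n) :
    (pvMask n m).set m 1 = pvMask n (m + 1) := by
  unfold pvMask
  apply List.ext_getElem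
  · simp
  · intro k h1 h2
    simp only [List.getElem_set, List.getElem_map, List.getElem_range] at *
    simp at h1
    split_ifs <;> omega

theorem pvMask_zero (n : Nat) : pvMask n 0 = List.replicate n 0 := by
  unfold pvMask
  apply List.ext_getElem <;> simp

theorem pvGet (edits : List String) {k : Nat} (h : k < edits.length) :
    edits[k]?.getD "" = edits[k] := by
  simp [List.getElem?_eq_getElem h]

-- the inner while loop walks to pvScanEnd, marking seen along the way
theorem pvInnerA_eq (edits : List String) (j : Nat) (hj : j ≤ edits.length) :
    pvInnerA edits (pvMask edits.length j) j =
      (pvMask edits.length (pvScanEnd edits j), pvScanEnd edits j,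
        decide (pvScanEnd edits j < edits.length ∧
          edits[pvScanEnd edits j]?.getD "" = "DEL")) := by
  fun_induction pvScanEnd edits j with
  | case1 j h hr ih =>
      rw [pvInnerA]
      simp only [h, dif_pos, if_pos (show (edits[j]?.getD "" != "KEEP" && edits[j]?.getD "" != "DEL") = true from hr)]
      rw [pvMask_set _ _ (by omega)]
      exact ih (by omega)
  | case2 j h hr =>
      rw [pvInnerA]
      rw [dif_pos h]
      have hr' : (edits[j]?.getD "" != "KEEP" && edits[j]?.getD "" != "DEL") = false := by
        simpa [pvIsRun] using hr
      rw [if_neg (by simp [hr'])]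
      by_cases hd : edits[j]?.getD "" = "DEL"
      · rw [if_pos (by simp [hd])]
        rw [pvGet edits h] at hd
        simp [hd, h]
      · rw [if_neg (by simp [hd])]
        simp [hd]
  | case3 j h =>
      rw [pvInnerA]
      have hn : ¬ j < edits.length := h
      rw [dif_neg hn]
      simp [hn]

-- A's outer loop leaves the state untouched on already-seen indices
theorem pvSkip (edits : List String) (b : Nat) :
    ∀ (a : Nat) (seen : List Int) (spans : List (Int × Int)),
      (∀ k, a ≤ k → k < a + b → seen[k]?.getD 0 = 1) →
      (List.range' a b).foldl (pvOuterStepA edits) (seen, spans) = (seen, spans) := by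
  induction b with
  | zero => intro a seen spans _; simp
  | succ b ih =>
      intro a seen spans hall
      rw [List.range'_succ, List.foldl_cons]
      have h1 : seen[a]?.getD 0 = 1 := hall a (le_refl a) (by omega)
      have hstep : pvOuterStepA edits (seen, spans) a = (seen, spans) := by
        unfold pvOuterStepA
        rw [if_neg (by simp [h1])]
      rw [hstep]
      exact ih (a + 1) seen spans (fun k hk1 hk2 => hall k (by omega) (by omega))

theorem pvA_main (edits : List String) :
    ∀ (m i : Nat) (spans : List (Int × Int)), i ≤ edits.length → edits.length - i ≤ m →
      ((List.range' i (edits.length - i)).foldl (pvOuterStepA edits)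
        (pvMask edits.length i, spans)).2 = spans ++ pvSpansFrom edits i := by
  intro m
  induction m with
  | zero =>
      intro i spans h1 h2
      have : i = edits.length := by omega
      subst this
      rw [pvSpansFrom]
      simp
  | succ m ih =>
      intro i spans h1 h2
      rcases Nat.eq_or_lt_of_le h1 with rfl | hlt
      · rw [pvSpansFrom]; simp
      · have hrange : edits.length - i = (edits.length - (i + 1)) + 1 := by omega
        rw [hrange, List.range'_succ, List.foldl_cons]
        have hget : (pvMask edits.length i)[i]?.getD 0 = 0 := by rw [pvMask_getD]; simp
        by_cases hr : pvIsRun (edits[i]?.getD "") = true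
        · -- run starts at i
          set j := pvScanEnd edits (i + 1) with hj
          have hj1 : i + 1 ≤ j := pvScanEnd_ge edits (i + 1)
          have hj2 : j ≤ edits.length := pvScanEnd_le edits (i + 1) (by omega)
          have hinner := pvInnerA_eq edits (i + 1) (by omega)
          have hstep : pvOuterStepA edits (pvMask edits.length i, spans) i =
              (pvMask edits.length j,
               spans ++ (if j = edits.length ∨ edits[j]?.getD "" = "KEEP"
                  then [((i : Int), (j : Int) - 1)] else [])) := by
            unfold pvOuterStepA
            rw [if_pos (by simp [hget])]
            unfold pvIsRun at hr
            rw [if_pos hr]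
            rw [show ((pvMask edits.length i, spans).1.set i 1 : List Int) = pvMask edits.length (i + 1)
              from pvMask_set _ _ (by omega)]
            rw [hinner, ← hj]
            have hge : decide (((j : Int) - 1) - (i : Int) ≥ 0) = true := by
              simp; omega
            by_cases hcase : j < edits.length ∧ edits[j]?.getD "" = "DEL"
            · have hnk : ¬ (j = edits.length ∨ edits[j]?.getD "" = "KEEP") := by
                rintro (h | h)
                · omega
                · rw [hcase.2] at h; exact absurd h (by decide)
              have hflag : decide (j < edits.length ∧ edits[j]?.getD "" = "DEL") = true := by
                simp only [decide_eq_true_eq]; exact hcase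
              rw [if_neg (by simp [hflag]), if_neg hnk, List.append_nil]
            · have hkeep : j = edits.length ∨ edits[j]?.getD "" = "KEEP" := by
                by_cases hje : j = edits.length
                · left; exact hje
                · right
                  have hjlt : j < edits.length := by omega
                  have hstop := pvScanEnd_stop edits (i + 1) (by rw [← hj]; exact hjlt)
                  rw [← hj] at hstop
                  unfold pvIsRun at hstop
                  simp only [Bool.and_eq_false_iff, bne_eq_false_iff_eq] at hstop
                  rcases hstop with h | h
                  · simpa using h
                  · exfalso; apply hcase; exact ⟨hjlt, by simpa using h⟩
              have hflag : decide (j < edits.length ∧ edits[j]?.getD "" = "DEL") = false := by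
                simp only [decide_eq_false_iff_not]
                exact hcase
              rw [if_pos (by simp [hflag]; omega), if_pos hkeep]
          rw [hstep]
          have hsplit : List.range' (i + 1) (edits.length - (i + 1)) =
              List.range' (i + 1) (j - (i + 1)) ++ List.range' (i + 1 + (j - (i + 1))) (edits.length - j) := by
            rw [List.range'_append_1]
            congr 1
            omega
          set spans' := spans ++ (if j = edits.length ∨ edits[j]?.getD "" = "KEEP"
              then [((i : Int), (j : Int) - 1)] else []) with hsp
          have hskip : List.foldl (pvOuterStepA edits) (pvMask edits.length j, spans')
              (List.range' (i + 1) (j - (i + 1))) = (pvMask edits.length j, spans') := by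
            apply pvSkip
            intro k hk1 hk2
            rw [pvMask_getD]
            have hkj : k < j := by omega
            have hkn : k < edits.length := by omega
            simp [hkj, hkn]
          have harg : i + 1 + (j - (i + 1)) = j := by omega
          rw [hsplit, List.foldl_append, hskip, harg, ih j spans' hj2 (by omega)]
          conv_rhs => rw [pvSpansFrom]
          rw [dif_pos hlt, if_pos hr]
          simp only [← hj, hsp, List.append_assoc]
        · -- no run at i
          have hstep : pvOuterStepA edits (pvMask edits.length i, spans) i =
              (pvMask edits.length (i + 1), spans) := by
            unfold pvOuterStepA
            unfold pvIsRun at hr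
            rw [if_pos (by simp [hget]), if_neg (by simp [hr])]
            rw [show ((pvMask edits.length i, spans).1.set i 1 : List Int) = pvMask edits.length (i + 1)
              from pvMask_set _ _ (by omega)]
          rw [hstep, ih (i + 1) spans (by omega) (by omega)]
          conv_rhs => rw [pvSpansFrom]
          rw [dif_pos hlt, if_neg hr]

theorem pvA_eq (edits : List String) : extract_a_spans edits = pvSpansFrom edits 0 := by
  unfold extract_a_spans
  rw [List.range_eq_range', ← pvMask_zero]
  have := pvA_main edits edits.length 0 [] (by omega) (by omega)
  simpa using this

-- B side
def pvFlush (n : Nat) (r : Option Nat × List (Int × Int)) : List (Int × Int) :=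
  match r.1 with
  | some s => r.2 ++ [((s : Int), (n : Int) - 1)]
  | none => r.2

theorem pvB_main (edits : List String) :
    ∀ (m i : Nat), edits.length - i ≤ m → i ≤ edits.length →
      (∀ spans, pvFlush edits.length (((edits.drop i).zipIdx i).foldl pvStepB (none, spans)) =
          spans ++ pvSpansFrom edits i)
      ∧ (∀ (s : Nat) (spans : List (Int × Int)),
          pvFlush edits.length (((edits.drop i).zipIdx i).foldl pvStepB (some s, spans)) =
          spans ++ ((if pvScanEnd edits i = edits.length ∨ edits[pvScanEnd edits i]?.getD "" = "KEEP"
              then [((s : Int), ((pvScanEnd edits i : Int)) - 1)] else [])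
            ++ pvSpansFrom edits (pvScanEnd edits i))) := by
  intro m
  induction m with
  | zero =>
      intro i h1 h2
      have hi : i = edits.length := by omega
      subst hi
      have hscan : pvScanEnd edits edits.length = edits.length := by
        rw [pvScanEnd]; simp
      constructor
      · intro spans
        rw [pvSpansFrom]
        simp [pvFlush]
      · intro s spans
        rw [hscan]
        conv_rhs => rw [pvSpansFrom]
        simp [pvFlush]
  | succ m ih =>
      intro i h1 h2
      rcases Nat.eq_or_lt_of_le h2 with rfl | hlt
      · exact (ih edits.length (by omega) (by omega)).imp (fun h => h) (fun h => h)
      · have hdrop : edits.drop i = edits[i]?.getD "" :: edits.drop (i + 1) := by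
          rw [List.getElem?_eq_getElem (by simpa using hlt)]
          exact List.drop_eq_getElem_cons hlt
        have ih' := ih (i + 1) (by omega) (by omega)
        constructor
        · intro spans
          rw [hdrop, List.zipIdx_cons, List.foldl_cons]
          by_cases hr : pvIsRun (edits[i]?.getD "") = true
          · have hr' : (edits[i]?.getD "" != "KEEP" && edits[i]?.getD "" != "DEL") = true := by
              simpa [pvIsRun] using hr
            have hstep : pvStepB (none, spans) (edits[i]?.getD "", i) = (some i, spans) := by
              unfold pvStepB
              rw [if_pos hr']
            rw [hstep, ih'.2 i spans]
            conv_rhs => rw [pvSpansFrom]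
            rw [dif_pos hlt, if_pos hr]
          · have hr' : (edits[i]?.getD "" != "KEEP" && edits[i]?.getD "" != "DEL") = false := by
              simpa [pvIsRun] using hr
            have hstep : pvStepB (none, spans) (edits[i]?.getD "", i) = (none, spans) := by
              unfold pvStepB
              rw [if_neg (by simp [hr'])]
            rw [hstep, ih'.1 spans]
            conv_rhs => rw [pvSpansFrom]
            rw [dif_pos hlt, if_neg hr]
        · intro s spans
          rw [hdrop, List.zipIdx_cons, List.foldl_cons]
          have hscan : pvScanEnd edits i =
              if pvIsRun (edits[i]?.getD "") then pvScanEnd edits (i + 1) else i := by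
            rw [pvScanEnd]; simp [hlt]
          by_cases hr : pvIsRun (edits[i]?.getD "") = true
          · have hr' : (edits[i]?.getD "" != "KEEP" && edits[i]?.getD "" != "DEL") = true := by
              simpa [pvIsRun] using hr
            have hstep : pvStepB (some s, spans) (edits[i]?.getD "", i) = (some s, spans) := by
              unfold pvStepB
              rw [if_pos hr']
            rw [hstep, ih'.2 s spans, hscan, if_pos hr]
          · have hr' : (edits[i]?.getD "" != "KEEP" && edits[i]?.getD "" != "DEL") = false := by
              simpa [pvIsRun] using hr
            by_cases hd : edits[i]?.getD "" = "DEL"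
            · have hstep : pvStepB (some s, spans) (edits[i]?.getD "", i) = (none, spans) := by
                unfold pvStepB
                rw [if_neg (by simp [hr'])]
                simp [hd]
              rw [hstep, ih'.1 spans, hscan, if_neg hr]
              have hcond : ¬ (i = edits.length ∨ edits[i]?.getD "" = "KEEP") := by
                rintro (h | h)
                · omega
                · rw [hd] at h; exact absurd h (by decide)
              rw [if_neg hcond]
              conv_rhs => rw [pvSpansFrom]
              rw [dif_pos hlt, if_neg hr]
              simp only [List.nil_append]
            · -- KEEP terminator
              have hk : edits[i]?.getD "" = "KEEP" := by
                simp only [Bool.and_eq_false_iff, bne_eq_false_iff_eq] at hr'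
                rcases hr' with h | h
                · exact h
                · exact absurd h hd
              have hstep : pvStepB (some s, spans) (edits[i]?.getD "", i) =
                  (none, spans ++ [((s : Int), (i : Int) - 1)]) := by
                unfold pvStepB
                rw [if_neg (by simp [hr'])]
                simp [hk]
              rw [hstep, ih'.1 _, hscan, if_neg hr]
              rw [if_pos (Or.inr hk)]
              conv_rhs => rw [pvSpansFrom]
              rw [dif_pos hlt, if_neg hr]
              simp only [List.append_assoc, List.singleton_append]

theorem pvB_eq (edits : List String) : extract_a_spans_alt edits = pvSpansFrom edits 0 := by
  unfold extract_a_spans_alt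
  have h := (pvB_main edits edits.length 0 (by omega) (by omega)).1 []
  simp only [List.drop_zero] at h
  unfold pvFlush at h
  simp only [List.nil_append] at h
  rw [← h]

-- ===== VERDICT (by name: the statement is the Claim_ definition above) =====
theorem extract_a_spans_spec : Claim_equal_extract_a_spans := by
  intro edits _
  unfold Spec_extract_a_spans
  rw [pvA_eq, pvB_eq]
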